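-- pv_equiv track=rewrite | github.com/alessandrofd/leetcode-python | 646-maximum-length-of-pair-chain.py | findLongestChain_greedy
-- ===== SOURCE A (Python) =====
-- from typing import List
--
-- def findLongestChain_greedy(pairs: List[List[int]]) -> int:
--     n = len(pairs)
--     if n == 1:
--         return 1
--
--     pairs.sort(key=lambda x: x[1])
--
--     result = 0
--     tail = -1001
--     for left, right in pairs:
--         if left > tail:
--             result += 1
--             tail = right
--
--     return result
-- ===== SOURCE B (Python) =====
-- from typing import List
--
-- def findLongestChain_greedy(pairs: List[List[int]]) -> int:
--     n = len(pairs)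
--     if n <= 1:
--         return n
--
--     pairs.sort(key=lambda x: x[1])
--
--     dp = []
--     for a, b in pairs:
--         best = 0
--         for (pa, pb), v in zip(pairs, dp):
--             if pb < a and v > best:
--                 best = v
--         dp.append(best + 1)
--
--     return max(dp)
-- ===== Notes on version B (the rewrite author's own statement) =====
-- stated objective: alternative
-- what changed: Replaces A's single greedy pass (result/tail accumulator seeded with the -1001 sentinel) by an LIS-style O(n^2) dynamic-programming table over the same sort by right endpoint, taking max(dp).
-- outside the precondition, e.g. on findLongestChain_greedy([[-2000, 1], [-2000, 2]]): A returns 0, B returns 1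
import Mathlib
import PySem

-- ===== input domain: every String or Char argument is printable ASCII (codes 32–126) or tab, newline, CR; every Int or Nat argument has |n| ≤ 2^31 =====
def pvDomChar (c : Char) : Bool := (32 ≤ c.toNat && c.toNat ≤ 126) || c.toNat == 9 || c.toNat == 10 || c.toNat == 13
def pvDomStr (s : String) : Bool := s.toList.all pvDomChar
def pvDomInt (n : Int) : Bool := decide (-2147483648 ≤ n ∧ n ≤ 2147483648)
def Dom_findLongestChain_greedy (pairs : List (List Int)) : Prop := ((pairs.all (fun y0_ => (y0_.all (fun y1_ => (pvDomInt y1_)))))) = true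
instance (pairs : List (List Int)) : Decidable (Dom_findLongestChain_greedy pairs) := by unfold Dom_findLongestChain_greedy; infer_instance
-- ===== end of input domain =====

-- B replaces A's single greedy pass by an O(n^2) LIS-style DP table after the same sort (objective: alternative
-- algorithm, not speed). Both Pythons sort the argument in place the same way; the theorems are about the return value.

-- ===== PORT A =====
-- literal port of A: early return for n == 1, sort by x[1], one greedy pass with (result, tail).
-- (indexing uses pyGetD: under Pre_ every accessed index is in range, exactly as in the Python)
def findLongestChain_greedy (pairs : List (List Int)) : Int :=
  let n := pairs.length
  if n = 1 then 1
  else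
    let s := PySem.List.sorted pairs (fun x => PySem.List.pyGetD x 1 0)
    let rt := s.foldl (fun (rt : Int × Int) p =>
        let left := PySem.List.pyGetD p 0 0
        let right := PySem.List.pyGetD p 1 0
        if left > rt.2 then (rt.1 + 1, right) else rt) ((0 : Int), (-1001 : Int))
    rt.1

-- ===== PORT B =====
-- literal port of Source B: base case n <= 1, same in-place sort, dp table built left to right,
-- inner pass over zip(pairs, dp), answer max(dp) (dp is nonempty there: n ≥ 2, so max never raises).
def findLongestChain_greedy_alt (pairs : List (List Int)) : Int :=
  let n := pairs.length
  if n ≤ 1 then (n : Int)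
  else
    let s := PySem.List.sorted pairs (fun x => PySem.List.pyGetD x 1 0)
    let dp := s.foldl (fun (dp : List Int) p =>
        let best := (s.zip dp).foldl (fun best qv =>
            if PySem.List.pyGetD qv.1 1 0 < PySem.List.pyGetD p 0 0 ∧ qv.2 > best then qv.2 else best) 0
        dp ++ [best + 1]) []
    (PySem.List.max? dp (fun x => x)).getD 0

-- ===== PRECONDITION & SPEC =====
-- Pre_ restricts, for lists of two or more pairs, to the problem's natural domain (each pair is a
-- 2-element list with first element ≥ -1000, the constraint A's tail = -1001 sentinel encodes):
-- outside it A raises on malformed pairs (unpacking), and a pair with first element ≤ -1001 is never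
-- chained by A's sentinel-seeded greedy, a domain artefact B's DP does not reproduce.
def Pre_findLongestChain_greedy (pairs : List (List Int)) : Prop :=
  pairs.length ≤ 1 ∨ ∀ p ∈ pairs, p.length = 2 ∧ -1000 ≤ PySem.List.pyGetD p 0 0
instance (pairs : List (List Int)) : Decidable (Pre_findLongestChain_greedy pairs) := by
  unfold Pre_findLongestChain_greedy; infer_instance
def pvWitness_findLongestChain_greedy : List (List Int) := [[1, 2], [3, 4], [0, 5]]
def Spec_findLongestChain_greedy (pairs : List (List Int)) (out : Int) : Prop := out = findLongestChain_greedy_alt pairs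
instance (pairs : List (List Int)) (out : Int) : Decidable (Spec_findLongestChain_greedy pairs out) := by unfold Spec_findLongestChain_greedy; infer_instance

-- ===== CLAIM (what is proved, stated in full; the proofs are below) =====
def Claim_equal_findLongestChain_greedy : Prop := ∀ (pairs : List (List Int)), Dom_findLongestChain_greedy pairs → Pre_findLongestChain_greedy pairs → Spec_findLongestChain_greedy pairs (findLongestChain_greedy pairs)

-- ===== LEMMAS AND PROOFS =====

-- the sorted list viewed as (left, right) pairs
def pvPair (p : List Int) : Int × Int := (PySem.List.pyGetD p 0 0, PySem.List.pyGetD p 1 0)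

-- A's greedy pass, recursively, with threshold t (the running tail)
def pvG (t : Int) : List (Int × Int) → Int
  | [] => 0
  | p :: m => if p.1 > t then 1 + pvG p.2 m else pvG t m

-- rights nondecreasing (what the sort guarantees)
def pvSorted (m : List (Int × Int)) : Prop := m.Pairwise (fun p q => p.2 ≤ q.2)

-- B's inner pass and dp table, over (left, right) pairs
def pvNext (L : List (Int × Int)) (dp : List Int) (a : Int) : Int :=
  (L.zip dp).foldl (fun best qv => if qv.1.2 < a ∧ qv.2 > best then qv.2 else best) 0

def pvDv (L : List (Int × Int)) : List Int :=
  L.foldl (fun dp p => dp ++ [pvNext L dp p.1 + 1]) []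

-- a chain: consecutive pairs satisfy right < next left; TChain also bounds the first left from below
def pvR (p q : Int × Int) : Prop := p.2 < q.1
def pvTChain (t : Int) (c : List (Int × Int)) : Prop :=
  List.IsChain pvR c ∧ ∀ h ∈ c.head?, t < h.1

theorem pvG_nonneg (t : Int) (m : List (Int × Int)) : 0 ≤ pvG t m := by
  induction m generalizing t with
  | nil => simp [pvG]
  | cons p m ih => simp only [pvG]; split <;> [linarith [ih p.2]; exact ih t]

-- monotonicity in the threshold, and the exchange inequality, for sorted lists
theorem pvG_lem (m : List (Int × Int)) (hs : pvSorted m) :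
    (∀ t t', t ≤ t' → pvG t' m ≤ pvG t m) ∧
    (∀ t b, (∀ q ∈ m, b ≤ q.2) → pvG t m ≤ 1 + pvG b m) := by
  induction m with
  | nil => simp [pvG]
  | cons x m ih =>
    obtain ⟨hx, hs'⟩ := List.pairwise_cons.mp hs
    obtain ⟨ihm, ihx⟩ := ih hs'
    constructor
    · intro t t' htt
      simp only [pvG]
      by_cases h1 : x.1 > t'
      · rw [if_pos h1, if_pos (by omega : x.1 > t)]
      · rw [if_neg h1]
        by_cases h2 : x.1 > t
        · rw [if_pos h2]; exact ihx t' x.2 hx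
        · rw [if_neg h2]; exact ihm t t' htt
    · intro t b hb
      have hbx : b ≤ x.2 := hb x (by simp)
      have hbm : ∀ q ∈ m, b ≤ q.2 := fun q hq => hb q (List.mem_cons_of_mem _ hq)
      simp only [pvG]
      by_cases h1 : x.1 > b
      · rw [if_pos h1]
        by_cases h2 : x.1 > t
        · rw [if_pos h2]; linarith [pvG_nonneg x.2 m]
        · rw [if_neg h2]; linarith [ihx t x.2 hx]
      · rw [if_neg h1]
        by_cases h2 : x.1 > t
        · rw [if_pos h2]; linarith [ihm b x.2 hbx]
        · rw [if_neg h2]; linarith [ihx t b hbm]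

-- G1: any chain of the sorted list whose first left exceeds t is counted by the greedy pass
theorem pvG_ge_chain : ∀ (m : List (Int × Int)), pvSorted m →
    ∀ c t, c.Sublist m → pvTChain t c → (c.length : Int) ≤ pvG t m := by
  intro m
  induction m with
  | nil =>
    intro _ c t hsub _
    rw [List.sublist_nil.mp hsub]; simp [pvG]
  | cons x m ih =>
    intro hs c t hsub htc
    obtain ⟨hx, hs'⟩ := List.pairwise_cons.mp hs
    rcases List.sublist_cons_iff.mp hsub with hc | ⟨r, rfl, hr⟩
    · have h1 := ih hs' c t hc htc
      simp only [pvG]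
      by_cases h2 : x.1 > t
      · rw [if_pos h2]
        linarith [(pvG_lem m hs').2 t x.2 hx]
      · rw [if_neg h2]; exact h1
    · obtain ⟨hch, hhd⟩ := htc
      have hxt : t < x.1 := hhd x (by simp)
      obtain ⟨hhead, hch'⟩ := List.isChain_cons.mp hch
      have h1 := ih hs' r x.2 hr ⟨hch', fun h hh => hhead h hh⟩
      simp only [pvG, if_pos (by omega : x.1 > t), List.length_cons]
      push_cast
      linarith

-- G2: the greedy pass's own selection is such a chain
theorem pvG_chain_exists : ∀ (m : List (Int × Int)) (t : Int),
    ∃ c, c.Sublist m ∧ pvTChain t c ∧ (c.length : Int) = pvG t m := by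
  intro m
  induction m with
  | nil => intro t; exact ⟨[], by simp, ⟨by simp, by simp⟩, by simp [pvG]⟩
  | cons x m ih =>
    intro t
    by_cases h : x.1 > t
    · obtain ⟨c, hsub, ⟨hch, hhd⟩, hlen⟩ := ih x.2
      refine ⟨x :: c, hsub.cons_cons x, ⟨?_, ?_⟩, ?_⟩
      · exact List.isChain_cons.mpr ⟨fun y hy => hhd y hy, hch⟩
      · intro h' hh'
        simp only [List.head?_cons, Option.mem_some_iff] at hh'
        subst hh'; exact h
      · simp only [pvG, if_pos h, List.length_cons]; push_cast; omega
    · obtain ⟨c, hsub, htc, hlen⟩ := ih t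
      refine ⟨c, hsub.cons x, htc, ?_⟩
      simp only [pvG, if_neg h]; exact hlen

-- the inner fold never decreases its accumulator
theorem pvFold_ge_init (a : Int) : ∀ (zs : List ((Int × Int) × Int)) (b : Int),
    b ≤ zs.foldl (fun best qv => if qv.1.2 < a ∧ qv.2 > best then qv.2 else best) b := by
  intro zs
  induction zs with
  | nil => intro b; simp
  | cons qv zs ih =>
    intro b
    simp only [List.foldl_cons]
    have h1 : b ≤ if qv.1.2 < a ∧ qv.2 > b then qv.2 else b := by split <;> omega
    exact le_trans h1 (ih _)

-- the inner fold dominates every admissible table entry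
theorem pvFold_ge_mem (a : Int) : ∀ (zs : List ((Int × Int) × Int)) (b : Int) (qv : (Int × Int) × Int),
    qv ∈ zs → qv.1.2 < a →
    qv.2 ≤ zs.foldl (fun best qv => if qv.1.2 < a ∧ qv.2 > best then qv.2 else best) b := by
  intro zs
  induction zs with
  | nil => intro b qv h; simp at h
  | cons q zs ih =>
    intro b qv hmem hlt
    simp only [List.foldl_cons]
    rcases List.mem_cons.mp hmem with rfl | hmem'
    · refine le_trans ?_ (pvFold_ge_init a zs _)
      split <;> omega
    · exact ih _ qv hmem' hlt

-- the inner fold returns its initial value or an admissible table entry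
theorem pvFold_cases (a : Int) : ∀ (zs : List ((Int × Int) × Int)) (b : Int),
    zs.foldl (fun best qv => if qv.1.2 < a ∧ qv.2 > best then qv.2 else best) b = b ∨
    ∃ qv ∈ zs, qv.1.2 < a ∧
      zs.foldl (fun best qv => if qv.1.2 < a ∧ qv.2 > best then qv.2 else best) b = qv.2 := by
  intro zs
  induction zs with
  | nil => intro b; left; simp
  | cons q zs ih =>
    intro b
    simp only [List.foldl_cons]
    rcases ih (if q.1.2 < a ∧ q.2 > b then q.2 else b) with h | ⟨qv, hmem, hlt, h⟩
    · by_cases hc : q.1.2 < a ∧ q.2 > b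
      · exact Or.inr ⟨q, List.mem_cons_self, hc.1, by rw [h, if_pos hc]⟩
      · exact Or.inl (by rw [h, if_neg hc])
    · exact Or.inr ⟨qv, List.mem_cons_of_mem _ hmem, hlt, h⟩

theorem pvNext_nonneg (L : List (Int × Int)) (dp : List Int) (a : Int) : 0 ≤ pvNext L dp a :=
  pvFold_ge_init a (L.zip dp) 0

theorem pvDvFold_length (f : List Int → (Int × Int) → Int) :
    ∀ (rest : List (Int × Int)) (dp : List Int),
    (rest.foldl (fun dp p => dp ++ [f dp p]) dp).length = dp.length + rest.length := by
  intro rest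
  induction rest with
  | nil => intro dp; simp
  | cons p rest ih =>
    intro dp
    simp only [List.foldl_cons]
    rw [ih]
    simp
    omega

theorem pvDv_length (L : List (Int × Int)) : (pvDv L).length = L.length := by
  unfold pvDv
  rw [pvDvFold_length (fun dp p => pvNext L dp p.1 + 1) L []]
  simp

-- zip truncates at the shorter list, so appending beyond it changes nothing
theorem pvZip_trunc : ∀ (L L₂ : List (Int × Int)) (dp : List Int),
    dp.length ≤ L.length → (L ++ L₂).zip dp = L.zip dp := by
  intro L
  induction L with
  | nil =>
    intro L₂ dp h
    have : dp = [] := List.eq_nil_of_length_eq_zero (Nat.le_zero.mp (by simpa using h))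
    simp [this]
  | cons x L ih =>
    intro L₂ dp h
    cases dp with
    | nil => simp
    | cons d dp =>
      simp only [List.cons_append, List.zip_cons_cons, List.cons.injEq, true_and]
      exact ih L₂ dp (by simpa using h)

theorem pvDvFold_congr (L L₂ : List (Int × Int)) :
    ∀ (rest : List (Int × Int)) (dp : List Int), dp.length + rest.length ≤ L.length →
    rest.foldl (fun dp p => dp ++ [pvNext (L ++ L₂) dp p.1 + 1]) dp =
    rest.foldl (fun dp p => dp ++ [pvNext L dp p.1 + 1]) dp := by
  intro rest
  induction rest with
  | nil => intro dp _; rfl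
  | cons p rest ih =>
    intro dp h
    simp only [List.foldl_cons]
    have hz : pvNext (L ++ L₂) dp p.1 = pvNext L dp p.1 := by
      unfold pvNext
      rw [pvZip_trunc L L₂ dp (by simp at h; omega)]
    rw [hz]
    exact ih (dp ++ [pvNext L dp p.1 + 1]) (by simp at h ⊢; omega)

theorem pvDv_concat (L : List (Int × Int)) (y : Int × Int) :
    pvDv (L ++ [y]) = pvDv L ++ [pvNext L (pvDv L) y.1 + 1] := by
  unfold pvDv
  rw [List.foldl_append]
  have h1 : L.foldl (fun dp p => dp ++ [pvNext (L ++ [y]) dp p.1 + 1]) [] =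
      L.foldl (fun dp p => dp ++ [pvNext L dp p.1 + 1]) [] :=
    pvDvFold_congr L [y] L [] (by simp)
  rw [h1]
  simp only [List.foldl_cons, List.foldl_nil]
  have h2 : pvNext (L ++ [y]) (pvDv L) y.1 = pvNext L (pvDv L) y.1 := by
    unfold pvNext
    rw [pvZip_trunc L [y] (pvDv L) (le_of_eq (pvDv_length L))]
  show _ ++ [pvNext (L ++ [y]) (L.foldl (fun dp p => dp ++ [pvNext L dp p.1 + 1]) []) y.1 + 1] = _
  rw [show L.foldl (fun dp p => dp ++ [pvNext L dp p.1 + 1]) [] = pvDv L from rfl, h2]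

theorem pvDv_prefix (L L₂ : List (Int × Int)) : pvDv L <+: pvDv (L ++ L₂) := by
  induction L₂ using List.reverseRecOn with
  | nil => simp
  | append_singleton L₂ y ih =>
    rw [show L ++ (L₂ ++ [y]) = (L ++ L₂) ++ [y] by simp, pvDv_concat]
    exact ih.trans (List.prefix_append _ _)

-- every dp entry arises from a split of the list
theorem pvDv_mem (L : List (Int × Int)) :
    ∀ v ∈ pvDv L, ∃ L₁ y L₂, L = L₁ ++ y :: L₂ ∧ v = pvNext L₁ (pvDv L₁) y.1 + 1 := by
  induction L using List.reverseRecOn with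
  | nil => intro v hv; simp [pvDv] at hv
  | append_singleton L y ih =>
    intro v hv
    rw [pvDv_concat] at hv
    rcases List.mem_append.mp hv with hv' | hv'
    · obtain ⟨L₁, y', L₂, heq, hval⟩ := ih v hv'
      exact ⟨L₁, y', L₂ ++ [y], by simp [heq], hval⟩
    · exact ⟨L, y, [], by simp, by simpa using hv'⟩

theorem pvGetElem_append_length {α : Type} : ∀ (A : List α) (y : α) (B : List α),
    (A ++ y :: B)[A.length]'(by simp) = y := by
  intro A
  induction A with
  | nil => intro y B; rfl
  | cons a A ih => intro y B; simp [ih y B]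

-- dp[i] as the value computed from the length-i prefix
theorem pvDv_getElem (L : List (Int × Int)) (i : Nat) (h : i < L.length) :
    (pvDv L)[i]'(by rw [pvDv_length]; exact h) =
      pvNext (L.take i) (pvDv (L.take i)) (L[i]).1 + 1 := by
  have hdec : L = L.take i ++ L[i] :: L.drop (i + 1) := by
    conv_lhs => rw [← List.take_append_drop i L]
    rw [List.drop_eq_getElem_cons h]
  have hlen : (L.take i).length = i := List.length_take_of_le (le_of_lt h)
  have hpre : pvDv (L.take i ++ [L[i]]) <+: pvDv L := by
    conv_rhs => rw [hdec, show L.take i ++ L[i] :: L.drop (i+1) = (L.take i ++ [L[i]]) ++ L.drop (i+1) by simp]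
    exact pvDv_prefix _ _
  have hlen2 : i < (pvDv (L.take i ++ [L[i]])).length := by
    rw [pvDv_length, List.length_append, hlen]; simp
  have hpr := List.IsPrefix.getElem hpre (i := i) hlen2
  have hlen3 : (pvDv (L.take i)).length = i := by rw [pvDv_length, hlen]
  have h2 : (pvDv (L.take i ++ [L[i]]))[i]'hlen2 =
      pvNext (L.take i) (pvDv (L.take i)) (L[i]).1 + 1 := by
    simp only [pvDv_concat]
    rw [List.getElem_append_right (by omega)]
    simp [hlen3]
  exact hpr.symm.trans h2

-- splitting a sublist ending in y at that y
theorem pvConcat_sublist_split {y : Int × Int} : ∀ (L c' : List (Int × Int)),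
    (c' ++ [y]).Sublist L → ∃ A B, L = A ++ y :: B ∧ c'.Sublist A := by
  intro L
  induction L with
  | nil => intro c' h; simp at h
  | cons x L ih =>
    intro c' h
    rcases List.sublist_cons_iff.mp h with h' | ⟨r, hr, hrs⟩
    · obtain ⟨A, B, rfl, hA⟩ := ih c' h'
      exact ⟨x :: A, B, rfl, hA.cons x⟩
    · cases c' with
      | nil =>
        simp at hr
        exact ⟨[], L, by simp [hr.1], by simp⟩
      | cons z c'' =>
        simp only [List.cons_append, List.cons.injEq] at hr
        obtain ⟨rfl, hr2⟩ := hr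
        obtain ⟨A, B, rfl, hA⟩ := ih c'' (hr2 ▸ hrs)
        exact ⟨z :: A, B, rfl, hA.cons_cons z⟩

-- D1: dp[i] bounds every chain ending at pair i
theorem pvDv_ge_chain_aux : ∀ (n : Nat) (L₁ : List (Int × Int)), L₁.length ≤ n →
    ∀ (y : Int × Int) (c : List (Int × Int)),
    c.Sublist L₁ → List.IsChain pvR (c ++ [y]) →
    (c.length : Int) + 1 ≤ pvNext L₁ (pvDv L₁) y.1 + 1 := by
  intro n
  induction n with
  | zero =>
    intro L₁ hn y c hsub _
    have hL : L₁ = [] := List.eq_nil_of_length_eq_zero (Nat.le_zero.mp hn)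
    subst hL
    rw [List.sublist_nil.mp hsub]
    simpa using pvNext_nonneg [] (pvDv []) y.1
  | succ n ih =>
    intro L₁ hn y c hsub hch
    rcases List.eq_nil_or_concat c with rfl | ⟨c', y₂, rfl⟩
    · simpa using pvNext_nonneg L₁ (pvDv L₁) y.1
    · rw [List.concat_eq_append] at hsub hch ⊢
      obtain ⟨A, B, rfl, hA⟩ := pvConcat_sublist_split L₁ c' hsub
      -- split the chain: c' ++ [y₂] is a chain, and y₂.2 < y.1
      have hch1 : List.IsChain pvR (c' ++ [y₂]) := by
        rw [show c' ++ [y₂] ++ [y] = (c' ++ [y₂]) ++ [y] by simp] at hch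
        exact (List.isChain_append.mp hch).1
      have hR : pvR y₂ y := by
        rw [show c' ++ [y₂] ++ [y] = (c' ++ [y₂]) ++ [y] by simp] at hch
        obtain ⟨_, _, hlast⟩ := List.isChain_append.mp hch
        exact hlast y₂ (by simp) y (by simp)
      have hAlen : A.length ≤ n := by
        have h' := hn
        simp only [List.length_append, List.length_cons] at h'
        omega
      have hIH := ih A hAlen y₂ c' hA hch1
      -- the dp entry at index A.length is the value for (A, y₂), and it feeds the fold for y
      have hidx : A.length < (A ++ y₂ :: B).length := by simp
      have hval : (pvDv (A ++ y₂ :: B))[A.length]'(by rw [pvDv_length]; exact hidx) =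
          pvNext A (pvDv A) y₂.1 + 1 := by
        have := pvDv_getElem (A ++ y₂ :: B) A.length hidx
        rwa [List.take_left, pvGetElem_append_length] at this
      have hmem : ((A ++ y₂ :: B)[A.length]'hidx,
          (pvDv (A ++ y₂ :: B))[A.length]'(by rw [pvDv_length]; exact hidx)) ∈
          (A ++ y₂ :: B).zip (pvDv (A ++ y₂ :: B)) := by
        have hz : A.length < ((A ++ y₂ :: B).zip (pvDv (A ++ y₂ :: B))).length := by
          rw [List.length_zip, pvDv_length]; simp
        have := List.getElem_zip (l := A ++ y₂ :: B) (l' := pvDv (A ++ y₂ :: B)) (h := hz)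
        rw [← this]
        exact List.getElem_mem hz
      rw [pvGetElem_append_length] at hmem
      rw [hval] at hmem
      have hle := pvFold_ge_mem y.1 ((A ++ y₂ :: B).zip (pvDv (A ++ y₂ :: B))) 0
        (y₂, pvNext A (pvDv A) y₂.1 + 1) hmem hR
      have : pvNext A (pvDv A) y₂.1 + 1 ≤ pvNext (A ++ y₂ :: B) (pvDv (A ++ y₂ :: B)) y.1 := hle
      simp only [List.length_append, List.length_cons, List.length_nil]
      push_cast
      omega

theorem pvDv_ge_chain (L₁ : List (Int × Int)) (y : Int × Int) (c : List (Int × Int))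
    (hsub : c.Sublist L₁) (hch : List.IsChain pvR (c ++ [y])) :
    (c.length : Int) + 1 ≤ pvNext L₁ (pvDv L₁) y.1 + 1 :=
  pvDv_ge_chain_aux L₁.length L₁ le_rfl y c hsub hch

-- D2: dp[i] is attained by a chain ending at pair i
theorem pvDv_chain_exists_aux : ∀ (n : Nat) (L : List (Int × Int)), L.length ≤ n →
    ∀ (y : Int × Int),
    ∃ c, c.Sublist L ∧ List.IsChain pvR (c ++ [y]) ∧ (c.length : Int) + 1 = pvNext L (pvDv L) y.1 + 1 := by
  intro n
  induction n with
  | zero =>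
    intro L hn y
    have hL : L = [] := List.eq_nil_of_length_eq_zero (Nat.le_zero.mp hn)
    subst hL
    exact ⟨[], by simp, by simp, by simp [pvNext, pvDv]⟩
  | succ n ih =>
    intro L hn y
    rcases pvFold_cases y.1 (L.zip (pvDv L)) 0 with h0 | ⟨qv, hmem, hlt, hval⟩
    · refine ⟨[], by simp, by simp, ?_⟩
      show (0 : Int) + 1 = pvNext L (pvDv L) y.1 + 1
      rw [show pvNext L (pvDv L) y.1 = 0 from h0]
    · -- the fold value is a dp entry: locate its index
      obtain ⟨i, hi, hqv⟩ := List.getElem_of_mem hmem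
      have hiL : i < L.length := by
        rw [List.length_zip, pvDv_length] at hi; omega
      have hqv' : qv = (L[i]'hiL, (pvDv L)[i]'(by rw [pvDv_length]; exact hiL)) := by
        rw [← hqv]; exact List.getElem_zip
      have hdpi : (pvDv L)[i]'(by rw [pvDv_length]; exact hiL) =
          pvNext (L.take i) (pvDv (L.take i)) (L[i]'hiL).1 + 1 := pvDv_getElem L i hiL
      have htlen : (L.take i).length ≤ n := by
        rw [List.length_take_of_le (le_of_lt hiL)]; omega
      obtain ⟨c', hsub', hch', hlen'⟩ := ih (L.take i) htlen (L[i]'hiL)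
      refine ⟨c' ++ [L[i]'hiL], ?_, ?_, ?_⟩
      · -- c' ++ [L[i]] is a sublist of take i ++ [L[i]], which is a sublist of L
        have h1 : (c' ++ [L[i]'hiL]).Sublist (L.take i ++ [L[i]'hiL]) :=
          hsub'.append (List.Sublist.refl _)
        have h2 : (L.take i ++ [L[i]'hiL]).Sublist L := by
          conv_rhs => rw [← List.take_append_drop i L, List.drop_eq_getElem_cons hiL]
          exact (List.Sublist.refl _).append
            ((List.nil_sublist _).cons_cons _)
        exact h1.trans h2
      · refine List.isChain_append.mpr ⟨hch', by simp, ?_⟩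
        intro a ha b hb
        rw [List.getLast?_concat] at ha
        simp only [Option.mem_some_iff, List.head?_cons] at ha hb
        subst ha; subst hb
        show (L[i]'hiL).2 < y.1
        have : qv.1 = L[i]'hiL := by rw [hqv']
        rw [← this]
        exact hlt
      · simp only [List.length_append, List.length_cons, List.length_nil]
        push_cast
        have h2 : qv.2 = pvNext (L.take i) (pvDv (L.take i)) (L[i]'hiL).1 + 1 := by
          rw [hqv', hdpi]
        have hval' : pvNext L (pvDv L) y.1 = qv.2 := hval
        rw [hval', h2]
        omega

theorem pvDv_chain_exists (L : List (Int × Int)) (y : Int × Int) :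
    ∃ c, c.Sublist L ∧ List.IsChain pvR (c ++ [y]) ∧ (c.length : Int) + 1 = pvNext L (pvDv L) y.1 + 1 :=
  pvDv_chain_exists_aux L.length L le_rfl y

-- main: on a sorted list of pairs with all lefts ≥ -1000, max(dp) = greedy count
theorem pv_main (L : List (Int × Int)) (hs : pvSorted L) (hl : ∀ p ∈ L, -1000 ≤ p.1)
    (hne : L ≠ []) : (PySem.List.max? (pvDv L) (fun x => x)).getD 0 = pvG (-1001) L := by
  have hdp_ne : pvDv L ≠ [] := by
    intro h
    apply hne
    have hlen0 := pvDv_length L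
    rw [h] at hlen0
    exact List.eq_nil_of_length_eq_zero hlen0.symm
  obtain ⟨m, hm⟩ : ∃ m, PySem.List.max? (pvDv L) (fun x => x) = some m := by
    cases hmax : PySem.List.max? (pvDv L) (fun x => x) with
    | none => exact absurd ((PySem.List.max?_eq_none_iff _ _).mp hmax) hdp_ne
    | some m => exact ⟨m, rfl⟩
  rw [hm, Option.getD_some]
  have hmmem : m ∈ pvDv L := PySem.List.max?_mem hm
  have hmax : ∀ v ∈ pvDv L, v ≤ m := fun v hv => PySem.List.max?_isMax hm v hv
  apply le_antisymm
  · -- every dp entry is the length of an actual chain, counted by the greedy pass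
    obtain ⟨L₁, y, L₂, heq, hv⟩ := pvDv_mem L m hmmem
    subst heq
    obtain ⟨c, hsub, hch, hlen⟩ := pvDv_chain_exists L₁ y
    have hsub2 : (c ++ [y]).Sublist (L₁ ++ y :: L₂) :=
      hsub.append ((List.nil_sublist L₂).cons_cons y)
    have htc : pvTChain (-1001) (c ++ [y]) := by
      refine ⟨hch, ?_⟩
      intro h hh
      have hmemL : h ∈ L₁ ++ y :: L₂ := hsub2.subset (List.mem_of_mem_head? hh)
      have := hl h hmemL
      omega
    have hg := pvG_ge_chain _ hs _ _ hsub2 htc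
    have hlc : ((c ++ [y]).length : Int) = m := by
      simp only [List.length_append, List.length_cons, List.length_nil]
      push_cast
      omega
    omega
  · -- the greedy chain's length is bounded by a dp entry, hence by max(dp)
    obtain ⟨c, hsub, ⟨hch, hhd⟩, hlen⟩ := pvG_chain_exists L (-1001)
    rcases List.eq_nil_or_concat c with rfl | ⟨c', y, rfl⟩
    · -- greedy found nothing: 0 ≤ m, as every dp entry is ≥ 1
      obtain ⟨A, y', B, heq, hv⟩ := pvDv_mem L m hmmem
      have := pvNext_nonneg A (pvDv A) y'.1
      simp only [List.length_nil] at hlen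
      omega
    · rw [List.concat_eq_append] at hsub hch hhd hlen
      obtain ⟨A, B, heq, hA⟩ := pvConcat_sublist_split L c' hsub
      subst heq
      have hd1 := pvDv_ge_chain A y c' hA hch
      have hvin : pvNext A (pvDv A) y.1 + 1 ∈ pvDv (A ++ y :: B) := by
        have hpre : pvDv (A ++ [y]) <+: pvDv (A ++ y :: B) := by
          conv_rhs => rw [show A ++ y :: B = (A ++ [y]) ++ B by simp]
          exact pvDv_prefix _ _
        apply hpre.sublist.subset
        rw [pvDv_concat]
        simp
      have hm2 := hmax _ hvin
      have hlc : ((c' ++ [y]).length : Int) = (c'.length : Int) + 1 := by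
        simp only [List.length_append, List.length_cons, List.length_nil]
        push_cast
        omega
      omega

-- port A's fold is the recursive greedy count over the (left, right) view
theorem pvAfold : ∀ (s : List (List Int)) (r t : Int),
    (s.foldl (fun (rt : Int × Int) p =>
        let left := PySem.List.pyGetD p 0 0
        let right := PySem.List.pyGetD p 1 0
        if left > rt.2 then (rt.1 + 1, right) else rt) (r, t)).1 = r + pvG t (s.map pvPair) := by
  intro s
  induction s with
  | nil => intro r t; simp [pvG]
  | cons p s ih =>
    intro r t
    simp only [List.foldl_cons, List.map_cons, pvG, pvPair]
    by_cases h : PySem.List.pyGetD p 0 0 > t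
    · simp only [if_pos h, ih]; omega
    · simp only [if_neg h, ih]

-- port B's dp fold is pvDv over the (left, right) view
theorem pvBfold (s : List (List Int)) :
    s.foldl (fun (dp : List Int) p =>
        let best := (s.zip dp).foldl (fun best qv =>
            if PySem.List.pyGetD qv.1 1 0 < PySem.List.pyGetD p 0 0 ∧ qv.2 > best then qv.2 else best) 0
        dp ++ [best + 1]) [] = pvDv (s.map pvPair) := by
  unfold pvDv
  rw [List.foldl_map]
  apply PySem.List.foldl_congr_mem
  intro dp p _
  show dp ++ [_] = dp ++ [pvNext (s.map pvPair) dp (pvPair p).1 + 1]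
  unfold pvNext
  rw [List.zip_map_left, List.foldl_map]
  rfl

-- ===== VERDICT (by name: the statement is the Claim_ definition above) =====
theorem findLongestChain_greedy_spec : Claim_equal_findLongestChain_greedy := by
  intro pairs _ hpre
  unfold Spec_findLongestChain_greedy
  by_cases h1 : pairs.length ≤ 1
  · rcases Nat.le_one_iff_eq_zero_or_eq_one.mp h1 with h0 | h0
    · rw [List.eq_nil_of_length_eq_zero h0]
      decide
    · obtain ⟨p, rfl⟩ := List.length_eq_one_iff.mp h0
      simp [findLongestChain_greedy, findLongestChain_greedy_alt]
  · rcases hpre with h | hp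
    · omega
    unfold findLongestChain_greedy findLongestChain_greedy_alt
    rw [if_neg (by omega : ¬ pairs.length = 1), if_neg h1]
    simp only [pvAfold, pvBfold, zero_add]
    have hsort : pvSorted ((PySem.List.sorted pairs (fun x => PySem.List.pyGetD x 1 0)).map pvPair) := by
      unfold pvSorted
      rw [List.pairwise_map]
      exact PySem.List.sorted_pairwise pairs (fun x => PySem.List.pyGetD x 1 0)
    have hleft : ∀ q ∈ (PySem.List.sorted pairs (fun x => PySem.List.pyGetD x 1 0)).map pvPair,
        -1000 ≤ q.1 := by
      intro q hq
      obtain ⟨x, hxs, rfl⟩ := List.mem_map.mp hq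
      exact (hp x ((PySem.List.mem_sorted pairs _ false x).mp hxs)).2
    have hne : (PySem.List.sorted pairs (fun x => PySem.List.pyGetD x 1 0)).map pvPair ≠ [] := by
      intro hnil
      have hlen2 := congrArg List.length hnil
      rw [List.length_map, PySem.List.length_sorted] at hlen2
      simp only [List.length_nil] at hlen2
      omega
    exact (pv_main _ hsort hleft hne).symm
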